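-- pv_equiv track=rewrite | github.com/LucasFSDias/CCW-Prog | CCW.py | aplicar_regra_sequencias
-- ===== SOURCE A (Python) =====
-- from collections import Counter
-- from itertools import chain
--
-- def aplicar_regra_sequencias(elementos, largura):
--     matriz = []
--     counter_restantes = Counter(elementos)
--
--     while True:
--         if len(counter_restantes) < largura:
--             break
--
--         elementos_ordenados = sorted(counter_restantes.items(), key=lambda x: (-x[1], x[0]))
--         encontrou = False
--         for num, _ in elementos_ordenados:
--             sequencia = [num + i for i in range(largura)]
--             if all(counter_restantes.get(val, 0) >= 1 for val in sequencia):
--                 matriz.append(sequencia)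
--                 for val in sequencia:
--                     counter_restantes[val] -= 1
--                     if counter_restantes[val] == 0:
--                         del counter_restantes[val]
--                 encontrou = True
--                 break
--         if not encontrou:
--             break
--
--     restantes = list(chain.from_iterable([[k] * v for k, v in counter_restantes.items()]))
--     return matriz, restantes
-- ===== SOURCE B (Python) =====
-- def aplicar_regra_sequencias(elementos, largura):
--     contagem = {}
--     for e in elementos:
--         contagem[e] = contagem.get(e, 0) + 1
--     matriz = []
--     while True:
--         # one sweep over the distinct values in descending order: a run-length counter
--         # (consecutive-integer adjacency) replaces A's per-candidate window tests, and a
--         # running maximum over the valid starts replaces A's sort-by-(-count,value)+scan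
--         melhor = None
--         alcance = 0
--         anterior = None
--         for v in reversed(sorted(contagem)):
--             alcance = alcance + 1 if anterior == v + 1 else 1
--             anterior = v
--             if alcance >= largura:
--                 chave = (contagem[v], -v)
--                 if melhor is None or chave > melhor:
--                     melhor = chave
--         if melhor is None:
--             break
--         num = -melhor[1]
--         matriz.append([num + i for i in range(largura)])
--         for i in range(largura):
--             val = num + i
--             contagem[val] -= 1
--             if contagem[val] == 0:
--                 del contagem[val]
--     restantes = [k for k, v in contagem.items() for _ in range(v)]
--     return matriz, restantes
-- ===== Notes on version B (the rewrite author's own statement) =====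
-- stated objective: faster
-- what changed: Instead of A's per-round sort of (value,count) items by (-count,value) followed by a scan that tests each candidate's whole window with largura membership lookups, B sweeps the distinct values once in descending order, maintaining a run-length counter over consecutive-integer adjacency to decide in O(1) per value whether it starts a full run, and a running maximum over those valid starts; the per-candidate window tests disappear.
import Mathlib
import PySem

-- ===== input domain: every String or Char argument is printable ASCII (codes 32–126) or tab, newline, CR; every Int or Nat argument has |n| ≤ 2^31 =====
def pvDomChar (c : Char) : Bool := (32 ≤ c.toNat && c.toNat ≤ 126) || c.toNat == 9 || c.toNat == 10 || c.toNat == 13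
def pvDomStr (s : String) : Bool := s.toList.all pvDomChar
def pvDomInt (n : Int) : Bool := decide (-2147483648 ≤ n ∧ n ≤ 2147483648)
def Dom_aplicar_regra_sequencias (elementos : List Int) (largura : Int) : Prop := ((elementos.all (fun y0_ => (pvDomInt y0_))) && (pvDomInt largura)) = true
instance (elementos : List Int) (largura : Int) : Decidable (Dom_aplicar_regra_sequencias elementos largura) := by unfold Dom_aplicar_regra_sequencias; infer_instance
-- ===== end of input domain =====

-- B replaces A's per-round sort of the (value, count) items plus per-candidate window
-- membership tests by a single sweep over the distinct values in descending order: a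
-- run-length counter (integer adjacency of consecutive sorted keys) decides which values
-- start a full run, and a running maximum over those starts picks the same sequence.

-- ===== PORT A =====

-- sequencia = [num + i for i in range(largura)]
def pvSeq (largura num : Int) : List Int :=
  (PySem.List.pyRange 0 largura 1).map (fun i => num + i)

-- all(counter_restantes.get(val, 0) >= 1 for val in sequencia)
def pvAvailA (cnt : PySem.Dict Int Int) (largura num : Int) : Bool :=
  (pvSeq largura num).all (fun v => decide (1 ≤ cnt.getD v 0))

-- the decrement-and-delete-zeros loop of A
def pvDecr (cnt : PySem.Dict Int Int) (seq : List Int) : PySem.Dict Int Int :=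
  seq.foldl (fun d val =>
    let d' := d.modify val 0 (fun x => x - 1)
    if d'.getD val 0 == 0 then d'.erase val else d') cnt

-- the 'while True' loop of A; fuel = len(elementos) + 1 bounds the iteration count
def pvLoopA (largura : Int) : Nat → PySem.Dict Int Int → List (List Int) → List (List Int) × PySem.Dict Int Int
  | 0, cnt, matriz => (matriz, cnt)
  | fuel + 1, cnt, matriz =>
    if (cnt.size : Int) < largura then (matriz, cnt)
    else
      match (PySem.List.sorted2 cnt.items (fun x => -x.2) (fun x => x.1)).find?
              (fun p => pvAvailA cnt largura p.1) with
      | none => (matriz, cnt)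
      | some p =>
        let seq := pvSeq largura p.1
        pvLoopA largura fuel (pvDecr cnt seq) (matriz ++ [seq])

def aplicar_regra_sequencias (elementos : List Int) (largura : Int) : List (List Int) × List Int :=
  let r := pvLoopA largura (elementos.length + 1) (PySem.Dict.counter elementos) []
  (r.1, (r.2.items.map (fun p => PySem.List.pyRepeat [p.1] p.2)).flatten)

-- ===== PORT B =====

-- Python tuple comparison 'chave > melhor' on (int, int)
def pvGtTup (a b : Int × Int) : Bool :=
  decide (b.1 < a.1) || (decide (a.1 = b.1) && decide (b.2 < a.2))

-- 'if melhor is None or chave > melhor: melhor = chave'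
def pvUpd (m : Option (Int × Int)) (c : Int × Int) : Option (Int × Int) :=
  match m with
  | none => some c
  | some b => if pvGtTup c b then some c else some b

-- one iteration of B's sweep; state = (melhor, alcance, anterior).
-- contagem[v] is ported as getD v 0: v is drawn from sorted(contagem), so the key lookup
-- cannot raise and equals the defaulted lookup.
def pvSweepStep (cnt : PySem.Dict Int Int) (largura : Int)
    (st : Option (Int × Int) × Int × Option Int) (v : Int) :
    Option (Int × Int) × Int × Option Int :=
  let alcance := if st.2.2 == some (v + 1) then st.2.1 + 1 else 1
  let melhor := if largura ≤ alcance then pvUpd st.1 (cnt.getD v 0, -v) else st.1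
  (melhor, alcance, some v)

-- 'for v in reversed(sorted(contagem)): …' returning melhor
def pvSweep (cnt : PySem.Dict Int Int) (largura : Int) : Option (Int × Int) :=
  (((PySem.List.sorted cnt.keys (fun v => v)).reverse).foldl
    (pvSweepStep cnt largura) (none, 0, none)).1

def pvLoopB (largura : Int) : Nat → PySem.Dict Int Int → List (List Int) → List (List Int) × PySem.Dict Int Int
  | 0, cnt, matriz => (matriz, cnt)
  | fuel + 1, cnt, matriz =>
    match pvSweep cnt largura with
    | none => (matriz, cnt)
    | some melhor =>
      let num := -melhor.2
      let cnt' := (PySem.List.pyRange 0 largura 1).foldl (fun d i =>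
          let val := num + i
          let d' := d.modify val 0 (fun x => x - 1)
          if d'.getD val 0 == 0 then d'.erase val else d') cnt
      pvLoopB largura fuel cnt' (matriz ++ [(PySem.List.pyRange 0 largura 1).map (fun i => num + i)])

def aplicar_regra_sequencias_alt (elementos : List Int) (largura : Int) : List (List Int) × List Int :=
  let contagem := elementos.foldl (fun d x => d.insert x (d.getD x 0 + 1)) PySem.Dict.empty
  let r := pvLoopB largura (elementos.length + 1) contagem []
  (r.1, r.2.items.flatMap (fun p => (PySem.List.pyRange 0 p.2 1).map (fun _ => p.1)))

-- ===== PRECONDITION & SPEC =====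
-- (no Pre_: the ports agree on every input; on largura ≤ 0 with a nonempty list both
-- PYTHON programs loop forever appending empty windows, so neither returns there)
def Spec_aplicar_regra_sequencias (elementos : List Int) (largura : Int) (out : List (List Int) × List Int) : Prop := out = aplicar_regra_sequencias_alt elementos largura
instance (elementos : List Int) (largura : Int) (out : List (List Int) × List Int) : Decidable (Spec_aplicar_regra_sequencias elementos largura out) := by unfold Spec_aplicar_regra_sequencias; infer_instance

-- ===== CLAIM (what is proved, stated in full; the proofs are below) =====
def Claim_equal_aplicar_regra_sequencias : Prop := ∀ (elementos : List Int) (largura : Int), Dom_aplicar_regra_sequencias elementos largura → Spec_aplicar_regra_sequencias elementos largura (aplicar_regra_sequencias elementos largura)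

-- ===== LEMMAS AND PROOFS =====

-- the (lexicographic) key A's sort orders by
def pvKeyL (p : Int × Int) : Int ×ₗ Int := toLex ((-p.2 : Int), p.1)

-- B's chave (c, -v) read as that key, and back
def pvPhi (c : Int × Int) : Int ×ₗ Int := toLex ((-c.1 : Int), (-c.2 : Int))
def pvPsi (k : Int ×ₗ Int) : Int × Int := ((-(ofLex k).1 : Int), (-(ofLex k).2 : Int))

-- Python's membership-only availability, as B's run-length sweep decides it
def pvOk (cnt : PySem.Dict Int Int) (largura v : Int) : Bool :=
  (List.range largura.toNat).all (fun i => decide (v + (i : Int) ∈ cnt.keys))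

-- a counter whose stored counts are all ≥ 1 (A deletes the zeros)
def pvInv (cnt : PySem.Dict Int Int) : Prop := ∀ p ∈ cnt.items, 1 ≤ p.2

theorem pv_min?_perm {l l' : List (Int ×ₗ Int)} (h : l.Perm l') : l.min? = l'.min? := by
  cases hl : l.min? with
  | none => rw [List.min?_eq_none_iff] at hl; subst hl; rw [h.symm.eq_nil]; rfl
  | some a =>
    rw [List.min?_eq_some_iff] at hl
    exact ((List.min?_eq_some_iff).mpr ⟨h.mem_iff.mp hl.1, fun b hb => hl.2 b (h.mem_iff.mpr hb)⟩).symm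

theorem pv_min?_of_sorted {s : List (Int × Int)}
    (h : List.Pairwise (fun a b => pvKeyL a ≤ pvKeyL b) s) :
    (s.map pvKeyL).min? = s.head?.map pvKeyL := by
  cases s with
  | nil => rfl
  | cons a t =>
    simp only [List.map_cons, List.head?_cons, Option.map_some]
    rw [List.min?_eq_some_iff]
    refine ⟨List.mem_cons_self, ?_⟩
    intro b hb
    simp only [List.mem_cons, List.mem_map] at hb
    rcases hb with rfl | ⟨x, hx, rfl⟩
    · exact le_refl _
    · exact (List.pairwise_cons.mp h).1 x hx

theorem pv_sorted2_eq (l : List (Int × Int)) :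
    PySem.List.sorted2 l (fun x => -x.2) (fun x => x.1) =
      PySem.List.sorted l pvKeyL := by
  simp only [PySem.List.sorted2, PySem.List.sorted, if_neg (by decide : ¬ (false = true))]
  congr 1
  funext acc x
  congr 1
  funext a b
  rw [Bool.eq_iff_iff]
  simp only [Bool.or_eq_true, Bool.and_eq_true, Bool.not_eq_true',
    decide_eq_true_iff, decide_eq_false_iff_not, pvKeyL, Prod.Lex.lt_iff]
  constructor
  · rintro (h | ⟨h1, h2⟩)
    · left; simpa using h
    · simp at h1 h2 ⊢; omega
  · rintro (h | ⟨h1, h2⟩)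
    · left; simpa using h
    · simp at h1 h2 ⊢; omega

-- A's choice, through the key map: first available in sorted order = minimal available key
theorem pv_Aside (cnt : PySem.Dict Int Int) (largura : Int) :
    Option.map pvKeyL
      ((PySem.List.sorted2 cnt.items (fun x => -x.2) (fun x => x.1)).find?
        (fun p => pvAvailA cnt largura p.1)) =
      ((cnt.items.filter (fun p => pvAvailA cnt largura p.1)).map pvKeyL).min? := by
  rw [pv_sorted2_eq]
  rw [← List.head?_filter]
  have hpw : List.Pairwise (fun a b => pvKeyL a ≤ pvKeyL b)
      ((PySem.List.sorted cnt.items pvKeyL).filter (fun p => pvAvailA cnt largura p.1)) :=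
    (PySem.List.sorted_pairwise cnt.items pvKeyL).filter _
  rw [← pv_min?_of_sorted hpw]
  apply pv_min?_perm
  exact (((PySem.List.sorted_perm cnt.items pvKeyL false).filter _).map _)

-- membership in a positive counter is count ≥ 1
theorem pv_mem_iff_getD (cnt : PySem.Dict Int Int) (hnd : cnt.keys.Nodup) (hinv : pvInv cnt)
    (x : Int) : x ∈ cnt.keys ↔ 1 ≤ cnt.getD x 0 := by
  constructor
  · intro hx
    simp only [PySem.Dict.keys, List.mem_map] at hx
    obtain ⟨p, hp, rfl⟩ := hx
    have h2 : cnt.getD p.1 0 = p.2 :=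
      PySem.Dict.getD_of_mem_items cnt (by simpa using hp) hnd 0
    rw [h2]
    exact hinv p hp
  · intro h1
    by_contra hx
    have hc : cnt.contains x = false := by
      rw [← Bool.not_eq_true]
      intro hc
      exact hx ((PySem.Dict.contains_iff_mem_keys cnt x).mp hc)
    rw [PySem.Dict.getD_of_not_contains cnt 0 hc] at h1
    omega

theorem pv_ok_eq_avail (cnt : PySem.Dict Int Int) (hnd : cnt.keys.Nodup) (hinv : pvInv cnt)
    (largura v : Int) : pvOk cnt largura v = pvAvailA cnt largura v := by
  simp only [pvOk, pvAvailA, pvSeq, List.all_map]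
  rcases lt_or_ge largura 0 with h | h
  · have he : PySem.List.pyRange 0 largura 1 = [] := by
      simp only [PySem.List.pyRange]
      rw [if_neg (by norm_num)]
      simp only [if_pos (by norm_num : (0:Int) < 1), if_neg (by omega : ¬ (0:Int) < largura)]
      simp
    rw [he]
    have h0 : largura.toNat = 0 := by omega
    rw [h0]
    rfl
  · obtain ⟨n, hn⟩ := Int.eq_ofNat_of_zero_le h
    rw [hn, PySem.List.pyRange_zero_natCast, List.all_map]
    have h0 : ((n : Int)).toNat = n := by omega
    rw [h0]
    refine List.all_congr rfl ?_
    intro i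
    simp only [Function.comp_apply]
    rw [Bool.eq_iff_iff, decide_eq_true_iff, decide_eq_true_iff]
    exact pv_mem_iff_getD cnt hnd hinv (v + i)

-- w ≤ run length at v ⟺ the whole window v..v+w-1 is present
theorem pv_run_ok (cnt : PySem.Dict Int Int) (w v r' : Int) (hr1 : 1 ≤ r')
    (hrun : ∀ i : Int, 0 ≤ i → i < r' → v + i ∈ cnt.keys) (hout : v + r' ∉ cnt.keys) :
    decide (w ≤ r') = pvOk cnt w v := by
  rw [Bool.eq_iff_iff, decide_eq_true_iff]
  unfold pvOk
  rw [List.all_eq_true]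
  constructor
  · intro hw i hi
    rw [List.mem_range] at hi
    rw [decide_eq_true_iff]
    exact hrun i (Int.natCast_nonneg i) (by omega)
  · intro hall
    by_contra hw
    push Not at hw
    have h0 : (0:Int) ≤ r' := by omega
    have hlt : r'.toNat < w.toNat := by omega
    have h2 := hall r'.toNat (List.mem_range.mpr hlt)
    rw [decide_eq_true_iff] at h2
    have h3 : ((r'.toNat : Nat) : Int) = r' := by omega
    rw [h3] at h2
    exact hout h2

-- the sweep's inner invariant: descending remaining values, run length r correct at a
theorem pv_sweep_inner (cnt : PySem.Dict Int Int) (w : Int) :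
    ∀ (d : List Int) (m : Option (Int × Int)) (r a : Int),
      d.Pairwise (fun x y => y < x) →
      (∀ v ∈ d, v < a) →
      (∀ v ∈ d, v ∈ cnt.keys) →
      (∀ s ∈ cnt.keys, s ∈ d ∨ a ≤ s) →
      1 ≤ r →
      (∀ i : Int, 0 ≤ i → i < r → a + i ∈ cnt.keys) →
      a + r ∉ cnt.keys →
      (d.foldl (pvSweepStep cnt w) (m, r, some a)).1 =
        (d.filter (pvOk cnt w)).foldl (fun m v => pvUpd m (cnt.getD v 0, -v)) m := by
  intro d
  induction d with
  | nil => intros; rfl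
  | cons v t ih =>
    intro m r a hpw hlt hsub hcov hr1 hrun hout
    obtain ⟨hv_t, hpw_t⟩ := List.pairwise_cons.mp hpw
    have hva : v < a := hlt v List.mem_cons_self
    have hvS : v ∈ cnt.keys := hsub v List.mem_cons_self
    rw [List.foldl_cons, List.filter_cons]
    set r' : Int := if a = v + 1 then r + 1 else 1 with hr'
    have hstep : pvSweepStep cnt w (m, r, some a) v =
        (if w ≤ r' then pvUpd m (cnt.getD v 0, -v) else m, r', some v) := by
      simp only [pvSweepStep, hr']
      by_cases ha : a = v + 1
      · simp [ha]
      · simp [ha, Ne.symm]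
    have hr'1 : 1 ≤ r' := by rw [hr']; split <;> omega
    have hrun' : ∀ i : Int, 0 ≤ i → i < r' → v + i ∈ cnt.keys := by
      intro i h0 hi
      by_cases ha : a = v + 1
      · rw [hr', if_pos ha] at hi
        rcases eq_or_lt_of_le h0 with h | h
        · simpa [← h] using hvS
        · have h2 := hrun (i - 1) (by omega) (by omega)
          have h3 : a + (i - 1) = v + i := by omega
          rwa [h3] at h2
      · rw [hr', if_neg ha] at hi
        have : i = 0 := by omega
        simpa [this] using hvS
    have hout' : v + r' ∉ cnt.keys := by
      by_cases ha : a = v + 1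
      · rw [hr', if_pos ha]
        have h3 : v + (r + 1) = a + r := by omega
        rwa [h3]
      · rw [hr', if_neg ha]
        intro hmem
        rcases hcov (v + 1) hmem with hin | hle
        · rcases List.mem_cons.mp hin with h | h
          · omega
          · have := hv_t _ h; omega
        · omega
    have hok : decide (w ≤ r') = pvOk cnt w v := pv_run_ok cnt w v r' hr'1 hrun' hout'
    have hcov' : ∀ s ∈ cnt.keys, s ∈ t ∨ v ≤ s := by
      intro s hs
      rcases hcov s hs with hin | hle
      · rcases List.mem_cons.mp hin with h | h
        · right; omega
        · left; exact h
      · right; omega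
    have hnext := ih (if w ≤ r' then pvUpd m (cnt.getD v 0, -v) else m) r' v hpw_t hv_t
      (fun x hx => hsub x (List.mem_cons_of_mem _ hx)) hcov' hr'1 hrun' hout'
    by_cases hw : w ≤ r'
    · have hokt : pvOk cnt w v = true := by rw [← hok]; simpa using hw
      rw [hstep, if_pos hw] at *
      rw [hokt]
      simpa using hnext
    · have hokf : pvOk cnt w v = false := by rw [← hok]; simpa using hw
      rw [hstep, if_neg hw] at *
      rw [hokf]
      simpa using hnext

theorem pv_sweep_eq (cnt : PySem.Dict Int Int) (w : Int) (hnd : cnt.keys.Nodup) :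
    pvSweep cnt w =
      (((PySem.List.sorted cnt.keys (fun v => v)).reverse.filter (pvOk cnt w)).foldl
        (fun m v => pvUpd m (cnt.getD v 0, -v)) none) := by
  unfold pvSweep
  have hperm : (PySem.List.sorted cnt.keys (fun v => v)).reverse.Perm cnt.keys :=
    (List.reverse_perm _).trans (PySem.List.sorted_perm cnt.keys (fun v => v) false)
  have hpw : (PySem.List.sorted cnt.keys (fun v => v)).reverse.Pairwise (fun x y => y < x) := by
    rw [List.pairwise_reverse]
    have hle := PySem.List.sorted_pairwise cnt.keys (fun v => v)
    have hne : (PySem.List.sorted cnt.keys (fun v => v)).Pairwise (fun x y => x ≠ y) :=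
      ((PySem.List.sorted_perm cnt.keys (fun v => v) false).nodup_iff.mpr hnd)
    exact (hle.and hne).imp (fun h => lt_of_le_of_ne h.1 h.2)
  cases hrev : (PySem.List.sorted cnt.keys (fun v => v)).reverse with
  | nil => rfl
  | cons v t =>
    rw [hrev] at hperm hpw
    obtain ⟨hv_t, hpw_t⟩ := List.pairwise_cons.mp hpw
    have hvS : v ∈ cnt.keys := hperm.mem_iff.mp List.mem_cons_self
    have hrun : ∀ i : Int, 0 ≤ i → i < 1 → v + i ∈ cnt.keys := by
      intro i h0 hi
      have : i = 0 := by omega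
      simpa [this] using hvS
    have hout : v + 1 ∉ cnt.keys := by
      intro hmem
      rcases List.mem_cons.mp (hperm.mem_iff.mpr hmem) with h | h
      · omega
      · have := hv_t _ h; omega
    have hok : decide (w ≤ (1:Int)) = pvOk cnt w v := pv_run_ok cnt w v 1 le_rfl hrun hout
    have hstep0 : pvSweepStep cnt w (none, 0, none) v =
        (if w ≤ (1:Int) then pvUpd none (cnt.getD v 0, -v) else none, 1, some v) := by
      simp [pvSweepStep]
    have hcov : ∀ s ∈ cnt.keys, s ∈ t ∨ v ≤ s := by
      intro s hs
      rcases List.mem_cons.mp (hperm.mem_iff.mpr hs) with h | h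
      · right; omega
      · left; exact h
    have hnext := pv_sweep_inner cnt w t
      (if w ≤ (1:Int) then pvUpd none (cnt.getD v 0, -v) else none) 1 v hpw_t hv_t
      (fun x hx => hperm.mem_iff.mp (List.mem_cons_of_mem _ hx)) hcov le_rfl hrun hout
    rw [List.foldl_cons, List.filter_cons, hstep0]
    by_cases hw : w ≤ (1:Int)
    · have hokt : pvOk cnt w v = true := by rw [← hok]; simpa using hw
      rw [if_pos hw] at hnext ⊢
      rw [hokt]
      simpa using hnext
    · have hokf : pvOk cnt w v = false := by rw [← hok]; simpa using hw
      rw [if_neg hw] at hnext ⊢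
      rw [hokf]
      simpa using hnext

-- running max of Python tuples = min of the flipped Lex keys
theorem pv_psi_phi (c : Int × Int) : pvPsi (pvPhi c) = c := by
  simp [pvPhi, pvPsi]

theorem pv_phi_psi (k : Int ×ₗ Int) : pvPhi (pvPsi k) = k := by
  simp [pvPhi, pvPsi]

theorem pv_gt_eq (c b : Int × Int) : pvGtTup c b = decide (pvPhi c < pvPhi b) := by
  rw [Bool.eq_iff_iff]
  simp only [pvGtTup, pvPhi, Bool.or_eq_true, Bool.and_eq_true, decide_eq_true_iff,
    Prod.Lex.lt_iff]
  simp only [ofLex_toLex]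
  omega

theorem pv_if_min (c b : Int × Int) :
    (if pvGtTup c b then c else b) = pvPsi (min (pvPhi b) (pvPhi c)) := by
  rw [pv_gt_eq, min_def]
  by_cases h : pvPhi c < pvPhi b
  · rw [if_pos (by simpa using h), if_neg (not_le_of_gt h), pv_psi_phi]
  · rw [if_neg (by simpa using h), if_pos (le_of_not_gt h), pv_psi_phi]

theorem pv_foldl_upd_some (t : List (Int × Int)) : ∀ b : Int × Int,
    t.foldl pvUpd (some b) = some (pvPsi ((t.map pvPhi).foldl min (pvPhi b))) := by
  induction t with
  | nil => intro b; simp [pv_psi_phi]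
  | cons x t ih =>
    intro b
    simp only [List.foldl_cons, List.map_cons]
    have hx : pvUpd (some b) x = some (if pvGtTup x b then x else b) := by
      simp only [pvUpd]; split <;> rfl
    rw [hx, pv_if_min, ih, pv_phi_psi]

theorem pv_foldl_upd (vs : List (Int × Int)) :
    vs.foldl pvUpd none = Option.map pvPsi ((vs.map pvPhi).min?) := by
  cases vs with
  | nil => rfl
  | cons x t =>
    simp only [List.foldl_cons, List.map_cons]
    have h1 : pvUpd none x = some x := rfl
    rw [h1, pv_foldl_upd_some, List.min?_cons']
    rfl

-- B's sweep result, as the minimal available pvKeyL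
theorem pv_Bside (cnt : PySem.Dict Int Int) (w : Int) (hnd : cnt.keys.Nodup) (hinv : pvInv cnt) :
    pvSweep cnt w =
      Option.map pvPsi (((cnt.items.filter (fun p => pvAvailA cnt w p.1)).map pvKeyL).min?) := by
  rw [pv_sweep_eq cnt w hnd]
  rw [show (((PySem.List.sorted cnt.keys (fun v => v)).reverse.filter (pvOk cnt w)).foldl
        (fun m v => pvUpd m (cnt.getD v 0, -v)) none) =
      ((((PySem.List.sorted cnt.keys (fun v => v)).reverse.filter (pvOk cnt w)).map
        (fun v => (cnt.getD v 0, -v))).foldl pvUpd none) from (List.foldl_map).symm]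
  rw [pv_foldl_upd]
  congr 1
  rw [List.map_map]
  have hfun : (pvPhi ∘ fun v => (cnt.getD v 0, -v)) = (fun v => pvKeyL (v, cnt.getD v 0)) := by
    funext v
    simp [pvPhi, pvKeyL]
  rw [hfun]
  have hY : cnt.items.filter (fun p => pvAvailA cnt w p.1) =
      (cnt.keys.filter (fun v => pvAvailA cnt w v)).map (fun k => (k, cnt.getD k 0)) := by
    rw [PySem.Dict.items_eq_map_keys cnt hnd 0, List.filter_map]
    rfl
  rw [hY, List.map_map]
  have hfun2 : (pvKeyL ∘ fun k => (k, cnt.getD k 0)) = (fun v => pvKeyL (v, cnt.getD v 0)) := rfl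
  rw [hfun2]
  apply pv_min?_perm
  apply List.Perm.map
  have hpred : pvOk cnt w = fun v => pvAvailA cnt w v :=
    funext (pv_ok_eq_avail cnt hnd hinv w)
  rw [hpred]
  exact ((List.reverse_perm _).trans (PySem.List.sorted_perm cnt.keys (fun v => v) false)).filter _

theorem pv_nodup_length_le {l l' : List Int} (h : l.Nodup) (hs : l ⊆ l') :
    l.length ≤ l'.length := by
  calc l.length = l.toFinset.card := (List.toFinset_card_of_nodup h).symm
  _ ≤ l'.toFinset.card := Finset.card_le_card (fun x hx => by simp at hx ⊢; exact hs hx)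
  _ ≤ l'.length := List.toFinset_card_le l'

-- no candidate is available when there are fewer distinct values than the width
theorem pv_small_guard (cnt : PySem.Dict Int Int) (largura : Int)
    (h : (cnt.size : Int) < largura) :
    cnt.items.filter (fun p => pvAvailA cnt largura p.1) = [] := by
  rw [List.filter_eq_nil_iff]
  intro p _ hav
  simp only [pvAvailA, pvSeq, List.all_map, List.all_eq_true, Function.comp_apply,
    decide_eq_true_iff] at hav
  have hlpos : (0:Int) ≤ largura := by
    have := Int.natCast_nonneg (PySem.Dict.size cnt); omega
  obtain ⟨n, hn⟩ := Int.eq_ofNat_of_zero_le hlpos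
  set w : List Int := (PySem.List.pyRange 0 largura 1).map (fun i => p.1 + i) with hw
  have hlen : w.length = n := by
    rw [hw, List.length_map, hn, PySem.List.pyRange_zero_natCast, List.length_map,
      List.length_range]
  have hnd : w.Nodup := by
    rw [hw, hn, PySem.List.pyRange_zero_natCast, List.map_map]
    refine List.Nodup.map ?_ (List.nodup_range)
    intro a b hab
    simp only [Function.comp_apply] at hab
    omega
  have hsub : w ⊆ cnt.keys := by
    intro v hv
    rw [hw] at hv
    obtain ⟨i, hi, rfl⟩ := List.mem_map.mp hv
    have h1 := hav i hi
    by_contra hmem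
    have hc : cnt.contains (p.1 + i) = false := by
      rw [← Bool.not_eq_true]
      intro hc
      exact hmem ((PySem.Dict.contains_iff_mem_keys cnt (p.1 + i)).mp hc)
    rw [PySem.Dict.getD_of_not_contains cnt 0 hc] at h1
    omega
  have hle := pv_nodup_length_le hnd hsub
  have hkeys : cnt.keys.length = cnt.size := by
    simp [PySem.Dict.keys, PySem.Dict.size]
  omega

-- erase/modify bookkeeping
theorem pv_keys_erase (d : PySem.Dict Int Int) (k : Int) :
    (d.erase k).keys = d.keys.filter (fun x => !(x == k)) := by
  simp only [PySem.Dict.erase, PySem.Dict.keys, List.filter_map]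
  rfl

theorem pv_find_filter (k k' : Int) (h : k' ≠ k) : ∀ (l : List (Int × Int)),
    List.find? (fun p => p.1 == k') (l.filter (fun p => !(p.1 == k))) =
      List.find? (fun p => p.1 == k') l := by
  intro l
  induction l with
  | nil => rfl
  | cons p t ih =>
    rw [List.filter_cons]
    by_cases hq : p.1 = k
    · rw [if_neg (by simp [hq])]
      rw [List.find?_cons_of_neg (by simp [hq, Ne.symm h])]
      exact ih
    · rw [if_pos (by simp [hq])]
      by_cases hp : p.1 = k'
      · rw [List.find?_cons_of_pos (by simp [hp]), List.find?_cons_of_pos (by simp [hp])]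
      · rw [List.find?_cons_of_neg (by simp [hp]), List.find?_cons_of_neg (by simp [hp])]
        exact ih

theorem pv_getD_erase_of_ne (d : PySem.Dict Int Int) (k k' : Int) (h : k' ≠ k) :
    (d.erase k).getD k' 0 = d.getD k' 0 := by
  simp only [PySem.Dict.getD_eq_get?_getD, PySem.Dict.get?, PySem.Dict.erase]
  rw [pv_find_filter k k' h]

def pvStepD (d : PySem.Dict Int Int) (val : Int) : PySem.Dict Int Int :=
  if (d.modify val 0 (fun x => x - 1)).getD val 0 == 0 then
    (d.modify val 0 (fun x => x - 1)).erase val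
  else d.modify val 0 (fun x => x - 1)

theorem pv_decr_eq (d : PySem.Dict Int Int) (seq : List Int) :
    pvDecr d seq = seq.foldl pvStepD d := rfl

theorem pv_stepD_nodup (d : PySem.Dict Int Int) (val : Int) (h : d.keys.Nodup) :
    (pvStepD d val).keys.Nodup := by
  unfold pvStepD
  have h1 : (d.modify val 0 (fun x => x - 1)).keys.Nodup := by
    simp only [PySem.Dict.modify]
    exact PySem.Dict.nodup_keys_insert d val _ h
  split
  · rw [pv_keys_erase]
    exact h1.filter _
  · exact h1

theorem pv_stepD_getD_of_ne (d : PySem.Dict Int Int) (val x : Int) (h : x ≠ val) :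
    (pvStepD d val).getD x 0 = d.getD x 0 := by
  unfold pvStepD
  have h1 := PySem.Dict.getD_modify_of_ne d (k := val) (k' := x) 0 (fun x => x - 1) h
  split
  · rw [pv_getD_erase_of_ne _ val x h, h1]
  · exact h1

theorem pv_mem_items_erase (d : PySem.Dict Int Int) (k : Int) (p : Int × Int) :
    p ∈ (d.erase k).items ↔ p ∈ d.items ∧ p.1 ≠ k := by
  simp [PySem.Dict.erase, List.mem_filter]

theorem pv_stepD_inv (d : PySem.Dict Int Int) (val : Int)
    (hinv : pvInv d) (hval : 1 ≤ d.getD val 0) : pvInv (pvStepD d val) := by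
  have hself : (d.modify val 0 (fun x => x - 1)).getD val 0 = d.getD val 0 - 1 :=
    PySem.Dict.getD_modify_self d val 0 _
  have hmem : ∀ p : Int × Int, p ∈ (d.modify val 0 (fun x => x - 1)).items →
      p = (val, d.getD val 0 - 1) ∨ (p ∈ d.items ∧ p.1 ≠ val) := by
    intro p hp
    simp only [PySem.Dict.modify] at hp
    exact (PySem.Dict.mem_items_insert d val _ p).mp hp
  unfold pvStepD
  split
  · rename_i hz
    intro p hp
    obtain ⟨hp1, hp2⟩ := (pv_mem_items_erase _ val p).mp hp
    rcases hmem p hp1 with rfl | ⟨hp3, _⟩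
    · exact absurd rfl hp2
    · exact hinv p hp3
  · rename_i hz
    rw [hself] at hz
    have hne : d.getD val 0 - 1 ≠ 0 := by simpa using hz
    intro p hp
    rcases hmem p hp with rfl | ⟨hp3, _⟩
    · simp only []
      omega
    · exact hinv p hp3

theorem pv_decr_nodup (seq : List Int) : ∀ (d : PySem.Dict Int Int), d.keys.Nodup →
    (pvDecr d seq).keys.Nodup := by
  induction seq with
  | nil => intro d h; exact h
  | cons v t ih =>
    intro d h
    rw [pv_decr_eq, List.foldl_cons, ← pv_decr_eq]
    exact ih _ (pv_stepD_nodup d v h)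

theorem pv_decr_inv (seq : List Int) : ∀ (d : PySem.Dict Int Int), d.keys.Nodup → pvInv d →
    seq.Nodup → (∀ val ∈ seq, 1 ≤ d.getD val 0) → pvInv (pvDecr d seq) := by
  induction seq with
  | nil => intro d _ hinv _ _; exact hinv
  | cons v t ih =>
    intro d hnd hinv hseq hav
    rw [pv_decr_eq, List.foldl_cons, ← pv_decr_eq]
    refine ih _ (pv_stepD_nodup d v hnd)
      (pv_stepD_inv d v hinv (hav v List.mem_cons_self)) hseq.of_cons ?_
    intro val hval
    have hne : val ≠ v := by
      intro h; subst h; exact (List.nodup_cons.mp hseq).1 hval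
    rw [pv_stepD_getD_of_ne d v val hne]
    exact hav val (List.mem_cons_of_mem _ hval)

theorem pv_seq_nodup (w num : Int) : (pvSeq w num).Nodup := by
  unfold pvSeq
  rcases lt_or_ge w 0 with h | h
  · have he : PySem.List.pyRange 0 w 1 = [] := by
      simp only [PySem.List.pyRange]
      rw [if_neg (by norm_num)]
      simp only [if_pos (by norm_num : (0:Int) < 1), if_neg (by omega : ¬ (0:Int) < w)]
      simp
    rw [he]; exact List.nodup_nil
  · obtain ⟨n, hn⟩ := Int.eq_ofNat_of_zero_le h
    rw [hn, PySem.List.pyRange_zero_natCast, List.map_map]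
    refine List.Nodup.map ?_ List.nodup_range
    intro a b hab
    simp only [Function.comp_apply] at hab
    omega

theorem pv_loop_eq (w : Int) : ∀ (fuel : Nat) (cnt : PySem.Dict Int Int) (matriz : List (List Int)),
    cnt.keys.Nodup → pvInv cnt →
    pvLoopA w fuel cnt matriz = pvLoopB w fuel cnt matriz := by
  intro fuel
  induction fuel with
  | zero => intros; rfl
  | succ fuel ih =>
    intro cnt matriz hnd hinv
    have hrel : pvSweep cnt w = Option.map (fun p : Int × Int => (p.2, -p.1))
        ((PySem.List.sorted2 cnt.items (fun x => -x.2) (fun x => x.1)).find?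
          (fun p => pvAvailA cnt w p.1)) := by
      rw [pv_Bside cnt w hnd hinv, ← pv_Aside cnt w, Option.map_map]
      congr 1
      funext p
      simp [pvPsi, pvKeyL, Function.comp]
    rw [pvLoopA, pvLoopB]
    by_cases hs : (cnt.size : Int) < w
    · rw [if_pos hs]
      have hfn : (PySem.List.sorted2 cnt.items (fun x => -x.2) (fun x => x.1)).find?
          (fun p => pvAvailA cnt w p.1) = none := by
        rw [List.find?_eq_none]
        intro p hp
        have hpm : p ∈ cnt.items :=
          (PySem.List.sorted2_perm cnt.items (fun x => -x.2) (fun x => x.1) false).mem_iff.mp hp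
        have hg := pv_small_guard cnt w hs
        rw [List.filter_eq_nil_iff] at hg
        simpa using hg p hpm
      rw [hrel, hfn]
      rfl
    · rw [if_neg hs]
      cases hf : (PySem.List.sorted2 cnt.items (fun x => -x.2) (fun x => x.1)).find?
          (fun p => pvAvailA cnt w p.1) with
      | none => rw [hrel, hf]; rfl
      | some p =>
        rw [hrel, hf]
        simp only [Option.map_some, neg_neg]
        have havp : pvAvailA cnt w p.1 = true := by
          have h0 := List.find?_some hf
          simpa using h0
        have hseqpos : ∀ val ∈ pvSeq w p.1, 1 ≤ cnt.getD val 0 := by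
          simp only [pvAvailA, List.all_eq_true, decide_eq_true_iff] at havp
          exact havp
        have hcnt' : (PySem.List.pyRange 0 w 1).foldl (fun d i =>
            let val := p.1 + i
            let d' := d.modify val 0 (fun x => x - 1)
            if d'.getD val 0 == 0 then d'.erase val else d') cnt = pvDecr cnt (pvSeq w p.1) := by
          unfold pvDecr pvSeq
          rw [List.foldl_map]
        show pvLoopA w fuel (pvDecr cnt (pvSeq w p.1)) (matriz ++ [pvSeq w p.1]) = _
        rw [show (PySem.List.pyRange 0 w 1).map (fun i => p.1 + i) = pvSeq w p.1 from rfl, hcnt']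
        exact ih (pvDecr cnt (pvSeq w p.1)) (matriz ++ [pvSeq w p.1])
          (pv_decr_nodup _ cnt hnd)
          (pv_decr_inv _ cnt hnd hinv (pv_seq_nodup w p.1) hseqpos)

theorem pv_rest_eq (items : List (Int × Int)) :
    (items.map (fun p => PySem.List.pyRepeat [p.1] p.2)).flatten =
      items.flatMap (fun p => (PySem.List.pyRange 0 p.2 1).map (fun _ => p.1)) := by
  rw [List.flatMap_def]
  congr 1
  apply List.map_congr_left
  intro p _
  rw [PySem.List.pyRepeat_singleton]
  have hlen : (PySem.List.pyRange 0 p.2 1).length = p.2.toNat := by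
    rcases lt_or_ge p.2 0 with h | h
    · have he : PySem.List.pyRange 0 p.2 1 = [] := by
        simp only [PySem.List.pyRange]
        rw [if_neg (by norm_num)]
        simp only [if_pos (by norm_num : (0:Int) < 1), if_neg (by omega : ¬ (0:Int) < p.2)]
        simp
      rw [he]; simp; omega
    · obtain ⟨n, hn⟩ := Int.eq_ofNat_of_zero_le h
      rw [hn, PySem.List.pyRange_zero_natCast]; simp
  calc List.replicate p.2.toNat p.1 = List.replicate (PySem.List.pyRange 0 p.2 1).length p.1 := by rw [hlen]
  _ = (PySem.List.pyRange 0 p.2 1).map (fun _ => p.1) := by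
      simp [List.map_const']

-- ===== VERDICT (by name: the statement is the Claim_ definition above) =====
theorem aplicar_regra_sequencias_spec : Claim_equal_aplicar_regra_sequencias := by
  intro elementos largura _
  show aplicar_regra_sequencias elementos largura = aplicar_regra_sequencias_alt elementos largura
  unfold aplicar_regra_sequencias aplicar_regra_sequencias_alt
  rw [PySem.Dict.foldl_insert_getD_add_one_eq_counter,
    pv_loop_eq largura _ _ _ (PySem.Dict.nodup_keys_counter elementos)
      (by
        intro p hp
        rw [PySem.Dict.items_counter] at hp
        obtain ⟨k, hk, rfl⟩ := List.mem_map.mp hp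
        have : 0 < elementos.count k := List.count_pos_iff.mpr ((PySem.Set.mem_ofList _ _).mp hk)
        simpa using this)]
  exact congrArg _ (pv_rest_eq _)
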